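-- pv_equiv track=rewrite | github.com/stanislavmarochok/Sbox-Tool | process_analyzed_data.py | get_sboxes_count_with_max_item_count_for_max_item
-- ===== SOURCE A (Python) =====
-- def get_sboxes_count_with_max_item_count_for_max_item(max_item, max_item_column, max_items_count_column):
--     max_item_count_result = {}
--     for max_item_count_index in range(len(max_items_count_column)):
--         max_item_count = max_items_count_column[max_item_count_index]
--         if max_item_count_result.get(str(max_item_count)) is None:
--             max_item_count_result[f'{max_item_count}'] = 0
--
--         if int(max_item_column[max_item_count_index]) == int(max_item):
--             max_item_count_result[f'{max_item_count}'] += 1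
--     return max_item_count_result
-- ===== SOURCE B (Python) =====
-- def get_sboxes_count_with_max_item_count_for_max_item(max_item, max_item_column, max_items_count_column):
--     target = int(max_item)
--     match_counts = {}
--     for a, c in zip(max_item_column, max_items_count_column):
--         if int(a) == target:
--             k = str(c)
--             match_counts[k] = match_counts.get(k, 0) + 1
--     return {str(v): match_counts.get(str(v), 0) for v in max_items_count_column}
-- ===== Notes on version B (the rewrite author's own statement) =====
-- stated objective: alternative
-- what changed: B stages the work instead of A's single interleaved insert-or-increment pass: it first counts only the matching rows into a separate counter dict over zip(max_item_column, max_items_count_column), then builds the result by a merge comprehension over the count column that looks each stringified value up in that counter (zero when absent).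
import Mathlib
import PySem

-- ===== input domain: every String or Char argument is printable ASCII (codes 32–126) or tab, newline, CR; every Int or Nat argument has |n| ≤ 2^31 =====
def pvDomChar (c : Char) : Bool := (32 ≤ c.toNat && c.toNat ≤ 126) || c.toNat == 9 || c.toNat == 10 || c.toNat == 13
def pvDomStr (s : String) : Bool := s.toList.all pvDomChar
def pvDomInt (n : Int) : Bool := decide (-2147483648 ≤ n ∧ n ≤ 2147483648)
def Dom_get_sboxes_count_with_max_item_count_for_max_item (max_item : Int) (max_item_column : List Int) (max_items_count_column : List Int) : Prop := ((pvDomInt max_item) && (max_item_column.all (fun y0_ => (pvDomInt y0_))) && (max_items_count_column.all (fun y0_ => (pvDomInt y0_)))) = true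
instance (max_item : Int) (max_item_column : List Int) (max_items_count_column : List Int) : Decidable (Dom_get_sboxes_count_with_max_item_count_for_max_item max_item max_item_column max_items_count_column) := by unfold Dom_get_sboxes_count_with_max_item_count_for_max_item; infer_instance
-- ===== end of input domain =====

-- B stages the work: count only the MATCHING rows into a separate counter over zip(mc, mcc),
-- then build the output by a merge comprehension over the count column (alternative decomposition).

-- ===== PORT A =====
-- A: one loop; per index, insert str(count) with 0 if the key is missing, then bump it when the
-- max_item column matches. dict → PySem.Dict; d[k] += 1 on the (guaranteed present) key is
-- insert k (getD k 0 + 1). Out-of-range mc[i] is excluded by Pre_, so pyGetD's default is never used.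
def get_sboxes_count_with_max_item_count_for_max_item (max_item : Int) (max_item_column : List Int) (max_items_count_column : List Int) : List (String × Int) :=
  ((PySem.List.pyRange 0 (max_items_count_column.length : Int) 1).foldl
    (fun (d : PySem.Dict String Int) i =>
      let c := PySem.List.pyGetD max_items_count_column i 0
      let d1 := if d.get? (PySem.Int.toStr c) = none then d.insert (PySem.Int.toStr c) 0 else d
      if PySem.List.pyGetD max_item_column i 0 == max_item then
        d1.insert (PySem.Int.toStr c) (d1.getD (PySem.Int.toStr c) 0 + 1)
      else d1)
    PySem.Dict.empty).items

-- ===== PORT B =====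
-- B: phase 1, a counting loop over zip(mc, mcc) that only touches matching rows
-- (match_counts[k] = match_counts.get(k, 0) + 1 → insert k (getD k 0 + 1));
-- phase 2, the merge comprehension {str(v): match_counts.get(str(v), 0) for v in mcc}
-- (dict comprehension = foldl insert, overwrite keeps first-occurrence order).
def get_sboxes_count_with_max_item_count_for_max_item_alt (max_item : Int) (max_item_column : List Int) (max_items_count_column : List Int) : List (String × Int) :=
  let target := max_item
  let match_counts := (max_item_column.zip max_items_count_column).foldl
    (fun (d : PySem.Dict String Int) p =>
      if p.1 == target then
        d.insert (PySem.Int.toStr p.2) (d.getD (PySem.Int.toStr p.2) 0 + 1)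
      else d)
    PySem.Dict.empty
  (max_items_count_column.foldl
    (fun (d : PySem.Dict String Int) v =>
      d.insert (PySem.Int.toStr v) (match_counts.getD (PySem.Int.toStr v) 0))
    PySem.Dict.empty).items

-- ===== PRECONDITION & SPEC =====
-- Pre_ excludes exactly the inputs where A raises IndexError: the loop reads
-- max_item_column[i] for every i < len(max_items_count_column).
def Pre_get_sboxes_count_with_max_item_count_for_max_item (max_item : Int) (max_item_column : List Int) (max_items_count_column : List Int) : Prop :=
  max_items_count_column.length ≤ max_item_column.length
instance (max_item : Int) (max_item_column : List Int) (max_items_count_column : List Int) : Decidable (Pre_get_sboxes_count_with_max_item_count_for_max_item max_item max_item_column max_items_count_column) := by unfold Pre_get_sboxes_count_with_max_item_count_for_max_item; infer_instance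
def pvWitness_get_sboxes_count_with_max_item_count_for_max_item : Int × List Int × List Int := (1, [1, 0, 1], [5, 6, 5])

def Spec_get_sboxes_count_with_max_item_count_for_max_item (max_item : Int) (max_item_column : List Int) (max_items_count_column : List Int) (out : List (String × Int)) : Prop := out = get_sboxes_count_with_max_item_count_for_max_item_alt max_item max_item_column max_items_count_column
instance (max_item : Int) (max_item_column : List Int) (max_items_count_column : List Int) (out : List (String × Int)) : Decidable (Spec_get_sboxes_count_with_max_item_count_for_max_item max_item max_item_column max_items_count_column out) := by unfold Spec_get_sboxes_count_with_max_item_count_for_max_item; infer_instance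

-- ===== CLAIM (what is proved, stated in full; the proofs are below) =====
def Claim_equal_get_sboxes_count_with_max_item_count_for_max_item : Prop := ∀ (max_item : Int) (max_item_column : List Int) (max_items_count_column : List Int), Dom_get_sboxes_count_with_max_item_count_for_max_item max_item max_item_column max_items_count_column → Pre_get_sboxes_count_with_max_item_count_for_max_item max_item max_item_column max_items_count_column → Spec_get_sboxes_count_with_max_item_count_for_max_item max_item max_item_column max_items_count_column (get_sboxes_count_with_max_item_count_for_max_item max_item max_item_column max_items_count_column)

-- ===== LEMMAS AND PROOFS =====
def pvStepA (m : Int) (d : PySem.Dict String Int) (a c : Int) : PySem.Dict String Int :=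
  let d1 := if d.get? (PySem.Int.toStr c) = none then d.insert (PySem.Int.toStr c) 0 else d
  if a == m then d1.insert (PySem.Int.toStr c) (d1.getD (PySem.Int.toStr c) 0 + 1) else d1

theorem pv_getD_stepA (m : Int) (d : PySem.Dict String Int) (a c : Int) (k : String) :
    (pvStepA m d a c).getD k 0
      = d.getD k 0 + (if a == m && PySem.Int.toStr c == k then 1 else 0) := by
  unfold pvStepA
  by_cases hn : d.get? (PySem.Int.toStr c) = none <;>
  by_cases ha : a == m <;>
  simp [hn, ha, PySem.Dict.getD_insert] <;>
  by_cases hk : k = PySem.Int.toStr c <;>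
  simp [hk, eq_comm, PySem.Dict.getD_eq_get?_getD, hn]

theorem pv_keys_stepA (m : Int) (d : PySem.Dict String Int) (a c : Int) :
    (pvStepA m d a c).keys = PySem.Set.add d.keys (PySem.Int.toStr c) := by
  unfold pvStepA
  by_cases hn : d.get? (PySem.Int.toStr c) = none
  · have hcon : d.contains (PySem.Int.toStr c) = false := by
      rw [PySem.Dict.contains_eq_isSome_get?, hn]; rfl
    have hmem : PySem.Int.toStr c ∉ d.keys := by
      intro hm
      rw [← PySem.Dict.contains_iff_mem_keys] at hm
      simp [hcon] at hm
    by_cases ha : a == m <;>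
      simp [hn, ha, PySem.Dict.keys_insert_of_contains _ _ (PySem.Dict.contains_insert_self d _ _),
        PySem.Dict.keys_insert_of_not_contains _ _ hcon, PySem.Set.add_of_not_mem hmem]
  · have hcon : d.contains (PySem.Int.toStr c) = true := by
      rw [PySem.Dict.contains_eq_isSome_get?]
      cases h' : d.get? (PySem.Int.toStr c) with
      | none => exact absurd h' hn
      | some v => rfl
    have hmem : PySem.Int.toStr c ∈ d.keys := (PySem.Dict.contains_iff_mem_keys _ _).mp hcon
    by_cases ha : a == m <;>
      simp [hn, ha, PySem.Dict.keys_insert_of_contains _ _ hcon, PySem.Set.add_of_mem hmem]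

theorem pv_getD_foldl_stepA (m : Int) (z : List (Int × Int)) (d : PySem.Dict String Int) (k : String) :
    (z.foldl (fun d p => pvStepA m d p.1 p.2) d).getD k 0
      = d.getD k 0 + (z.countP (fun p => p.1 == m && PySem.Int.toStr p.2 == k) : Int) := by
  induction z generalizing d with
  | nil => simp
  | cons p z ih =>
    simp only [List.foldl_cons, ih, pv_getD_stepA, List.countP_cons]
    by_cases hp : (p.1 == m && PySem.Int.toStr p.2 == k) = true <;> simp [hp] <;> ring

theorem pv_keys_foldl_stepA (m : Int) (z : List (Int × Int)) (d : PySem.Dict String Int) :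
    (z.foldl (fun d p => pvStepA m d p.1 p.2) d).keys
      = PySem.Set.update d.keys (z.map (fun p => PySem.Int.toStr p.2)) := by
  induction z generalizing d with
  | nil => simp [PySem.Set.update_nil]
  | cons p z ih =>
    simp only [List.foldl_cons, List.map_cons, PySem.Set.update_cons, ih, pv_keys_stepA]

theorem pv_foldl_idx_zip_aux {γ : Type} (g : γ → Int → Int → γ) (l₁ l₂ : List Int) (init : γ)
    (h : l₂.length ≤ l₁.length) (n : Nat) (hn : n ≤ l₂.length) :
    (PySem.List.pyRange 0 (n : Int) 1).foldl
      (fun acc i => g acc (PySem.List.pyGetD l₁ i 0) (PySem.List.pyGetD l₂ i 0)) init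
    = ((l₁.zip l₂).take n).foldl (fun acc p => g acc p.1 p.2) init := by
  induction n with
  | zero => simp [PySem.List.pyRange_one_eq_nil]
  | succ n ih =>
    have hn' : n ≤ l₂.length := Nat.le_of_succ_le hn
    have hlt : n < l₂.length := hn
    have hlt1 : n < l₁.length := lt_of_lt_of_le hlt h
    have hz : n < (l₁.zip l₂).length := by simp [List.length_zip]; omega
    have hrange : PySem.List.pyRange 0 ((n : Int) + 1) 1
        = PySem.List.pyRange 0 (n : Int) 1 ++ [(n : Int)] :=
      PySem.List.pyRange_one_succ_right (by positivity)
    have hcast : ((n + 1 : Nat) : Int) = (n : Int) + 1 := by push_cast; ring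
    rw [hcast, hrange, List.foldl_append, ih hn', List.take_succ,
      List.getElem?_eq_getElem hz, List.foldl_append]
    simp [List.getElem_zip, PySem.List.pyGetD_natCast, List.getD_eq_getElem?_getD,
      List.getElem?_eq_getElem hlt1, List.getElem?_eq_getElem hlt]

theorem pv_foldl_idx_zip {γ : Type} (g : γ → Int → Int → γ) (l₁ l₂ : List Int) (init : γ)
    (h : l₂.length ≤ l₁.length) :
    (PySem.List.pyRange 0 (l₂.length : Int) 1).foldl
      (fun acc i => g acc (PySem.List.pyGetD l₁ i 0) (PySem.List.pyGetD l₂ i 0)) init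
    = (l₁.zip l₂).foldl (fun acc p => g acc p.1 p.2) init := by
  rw [pv_foldl_idx_zip_aux g l₁ l₂ init h l₂.length le_rfl,
    List.take_of_length_le (by simp [List.length_zip])]

def pvStepC (m : Int) (d : PySem.Dict String Int) (p : Int × Int) : PySem.Dict String Int :=
  if p.1 == m then d.insert (PySem.Int.toStr p.2) (d.getD (PySem.Int.toStr p.2) 0 + 1) else d

theorem pv_getD_foldl_stepC (m : Int) (z : List (Int × Int)) (d : PySem.Dict String Int) (k : String) :
    (z.foldl (pvStepC m) d).getD k 0
      = d.getD k 0 + (z.countP (fun p => p.1 == m && PySem.Int.toStr p.2 == k) : Int) := by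
  induction z generalizing d with
  | nil => simp
  | cons p z ih =>
    have hstep : (pvStepC m d p).getD k 0
        = d.getD k 0 + (if p.1 == m && PySem.Int.toStr p.2 == k then 1 else 0) := by
      unfold pvStepC
      by_cases ha : (p.1 == m) = true
      · rw [if_pos ha, PySem.Dict.getD_insert]
        by_cases hk : k = PySem.Int.toStr p.2
        · simp [hk, ha]
        · simp only [if_neg hk]
          simp [ha]
          exact fun h => hk h.symm
      · simp [ha]
    simp only [List.foldl_cons, ih, hstep, List.countP_cons]
    by_cases hp : (p.1 == m && PySem.Int.toStr p.2 == k) = true <;> simp [hp] <;> ring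

theorem pv_getD_merge (counts : PySem.Dict String Int) (l : List Int) (d : PySem.Dict String Int)
    (k : String) :
    ((l.foldl (fun (d : PySem.Dict String Int) v =>
        d.insert (PySem.Int.toStr v) (counts.getD (PySem.Int.toStr v) 0)) d).getD k 0)
      = if k ∈ l.map PySem.Int.toStr then counts.getD k 0 else d.getD k 0 := by
  induction l generalizing d with
  | nil => simp
  | cons v l ih =>
    simp only [List.foldl_cons, ih, List.map_cons, List.mem_cons]
    by_cases hm : k ∈ l.map PySem.Int.toStr <;>
      by_cases hk : k = PySem.Int.toStr v <;>
      simp [hm, hk, PySem.Dict.getD_insert]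

theorem pv_main (m : Int) (mc mcc : List Int) (hpre : mcc.length ≤ mc.length) :
    get_sboxes_count_with_max_item_count_for_max_item m mc mcc
      = get_sboxes_count_with_max_item_count_for_max_item_alt m mc mcc := by
  unfold get_sboxes_count_with_max_item_count_for_max_item
    get_sboxes_count_with_max_item_count_for_max_item_alt
  show ((PySem.List.pyRange 0 (mcc.length : Int) 1).foldl
      (fun acc i => pvStepA m acc (PySem.List.pyGetD mc i 0) (PySem.List.pyGetD mcc i 0))
      PySem.Dict.empty).items
    = (mcc.foldl (fun (d : PySem.Dict String Int) v =>
        d.insert (PySem.Int.toStr v)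
          (((mc.zip mcc).foldl (pvStepC m) PySem.Dict.empty).getD (PySem.Int.toStr v) 0))
        PySem.Dict.empty).items
  rw [pv_foldl_idx_zip _ mc mcc _ hpre]
  set z := mc.zip mcc with hzdef
  have hsnd : z.map (fun p => PySem.Int.toStr p.2) = mcc.map PySem.Int.toStr := by
    have := List.map_snd_zip hpre
    calc z.map (fun p => PySem.Int.toStr p.2) = (z.map Prod.snd).map PySem.Int.toStr := by
          rw [List.map_map]; rfl
      _ = mcc.map PySem.Int.toStr := by rw [this]
  have hkA : (z.foldl (fun d p => pvStepA m d p.1 p.2) PySem.Dict.empty).keys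
      = PySem.Set.ofList (mcc.map PySem.Int.toStr) := by
    rw [pv_keys_foldl_stepA, PySem.Dict.keys_empty, PySem.Set.update_nil_left, hsnd]
  have hndA : (z.foldl (fun d p => pvStepA m d p.1 p.2) PySem.Dict.empty).keys.Nodup := by
    rw [hkA]; exact PySem.Set.nodup_ofList _
  have hkB : (mcc.foldl (fun (d : PySem.Dict String Int) v =>
        d.insert (PySem.Int.toStr v)
          ((z.foldl (pvStepC m) PySem.Dict.empty).getD (PySem.Int.toStr v) 0))
        PySem.Dict.empty).keys
      = PySem.Set.ofList (mcc.map PySem.Int.toStr) := by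
    rw [PySem.Dict.keys_foldl_insert_key, PySem.Dict.keys_empty, PySem.Set.update_nil_left]
  have hndB : (mcc.foldl (fun (d : PySem.Dict String Int) v =>
        d.insert (PySem.Int.toStr v)
          ((z.foldl (pvStepC m) PySem.Dict.empty).getD (PySem.Int.toStr v) 0))
        PySem.Dict.empty).keys.Nodup := by
    rw [hkB]; exact PySem.Set.nodup_ofList _
  rw [PySem.Dict.items_eq_map_keys _ hndA 0, PySem.Dict.items_eq_map_keys _ hndB 0, hkA, hkB]
  refine List.map_congr_left (fun k hk => ?_)
  have hmem : k ∈ mcc.map PySem.Int.toStr := (PySem.Set.mem_ofList _ _).mp hk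
  rw [pv_getD_foldl_stepA, PySem.Dict.getD_empty, pv_getD_merge, if_pos hmem,
    pv_getD_foldl_stepC, PySem.Dict.getD_empty]

-- ===== VERDICT (by name: the statement is the Claim_ definition above) =====
theorem get_sboxes_count_with_max_item_count_for_max_item_spec : Claim_equal_get_sboxes_count_with_max_item_count_for_max_item := by
  intro max_item max_item_column max_items_count_column _ hpre
  exact pv_main max_item max_item_column max_items_count_column hpre
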